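-- pv_equiv track=rewrite | github.com/JwMudfish/object_on_the_shelf | api_ver.py | adjust_vision_result
-- ===== SOURCE A (Python) =====
-- def adjust_vision_result(vision_result):  # box 7개
--     rst = []
--     for vision_list in vision_result:
--         vision_result = list(map(lambda x : x.split('_')[-1], vision_list))
--         result = vision_result.copy()
--         for i in range(len(vision_result)-3):         # 독립형 기준
--             if vision_result[i] == 'pet':
--                 if i > 0:
--                     result[i-1] = 'pet'
--                 result[i+1] = 'pet'
--         rst.append(result)
--     return rst
-- ===== SOURCE B (Python) =====
-- def _dilate(vision_list):
--     # stage 1: strip prefixes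
--     s = [x.split('_')[-1] for x in vision_list]
--     n = len(s)
--     # stage 2: core mask = pets eligible to spread (first n-3 positions only)
--     pets = [tok == 'pet' for tok in s]
--     core = pets[:max(n - 3, 0)]
--     core += [False] * (n - len(core))
--     # stage 3: dilate the core mask by shifting it as whole lists
--     nxt = core[1:] + [False]          # core of right neighbour
--     prv = [False] + core[:-1]         # core of left neighbour
--     # stage 4: overlay the dilated mask on the tokens
--     return ['pet' if p or a or b else tok
--             for tok, p, a, b in zip(s, pets, nxt, prv)]
--
--
-- def adjust_vision_result(vision_result):
--     return [_dilate(vision_list) for vision_list in vision_result]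
-- ===== Notes on version B (the rewrite author's own statement) =====
-- stated objective: alternative
-- what changed: Replaced A's scatter loop (each found 'pet' mutates its neighbours in a copied list) by a staged mask-dilation pipeline: build a truncated boolean 'core pet' mask, dilate it by shifting the whole mask left and right as lists, then overlay the dilated mask on the stripped tokens.
import Mathlib
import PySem

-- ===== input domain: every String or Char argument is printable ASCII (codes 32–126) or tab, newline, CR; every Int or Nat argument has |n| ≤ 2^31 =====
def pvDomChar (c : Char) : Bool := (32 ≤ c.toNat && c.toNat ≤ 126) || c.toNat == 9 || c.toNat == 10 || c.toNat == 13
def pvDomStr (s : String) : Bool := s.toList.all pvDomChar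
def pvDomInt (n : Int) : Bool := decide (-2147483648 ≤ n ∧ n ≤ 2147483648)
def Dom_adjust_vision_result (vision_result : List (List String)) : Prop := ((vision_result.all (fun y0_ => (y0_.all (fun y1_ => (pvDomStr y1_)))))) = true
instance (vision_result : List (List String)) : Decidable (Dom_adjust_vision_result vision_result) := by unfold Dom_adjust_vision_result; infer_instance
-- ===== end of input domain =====

-- B replaces A's scatter loop (each 'pet' mutates its neighbours in a copied list) by a
-- staged mask-dilation pipeline: a truncated boolean core mask, dilated by list shifts,
-- overlaid on the stripped tokens (alternative decomposition, same cost).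


-- ===== PORT A =====
-- x.split('_')[-1] (split? is some since the separator is nonempty; [-1] is in range since split is nonempty)
def pvSplitLast (x : String) : String :=
  (PySem.List.pyGet? ((PySem.Str.split? x "_").getD []) (-1)).getD ""

-- body of A's inner for-loop: the scatter writes into the copied list
def pvStepA (vr : List String) (result : List String) (i : Nat) : List String :=
  if vr.getD i "" = "pet" then
    (if i > 0 then result.set (i - 1) "pet" else result).set (i + 1) "pet"
  else result

-- body of A's outer loop for one vision_list
def pvLineA (vision_list : List String) : List String :=
  let vr := vision_list.map pvSplitLast
  (List.range (vr.length - 3)).foldl (pvStepA vr) vr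

def adjust_vision_result (vision_result : List (List String)) : List (List String) :=
  vision_result.foldl (fun rst vision_list => rst ++ [pvLineA vision_list]) []

-- ===== PORT B =====  (Source B's _dilate pipeline, stage by stage)
-- stage 2a: pets = [tok == 'pet' for tok in s]
def pvPets (s : List String) : List Bool := s.map (fun tok => tok == "pet")

-- stage 2b: core = pets[:max(n-3,0)] padded with False to length n
-- (Python's max(n-3,0) is Nat truncated subtraction here)
def pvCoreOf (s : List String) : List Bool :=
  let c := (pvPets s).take (s.length - 3)
  c ++ List.replicate (s.length - c.length) false

-- stages 1,3,4: strip, shift the core mask both ways, overlay on the tokens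
def pvDilate (vision_list : List String) : List String :=
  let s := vision_list.map pvSplitLast
  let core := pvCoreOf s
  let nxt := core.drop 1 ++ [false]
  let prv := false :: core.dropLast
  (s.zip ((pvPets s).zip (nxt.zip prv))).map
    (fun p => if p.2.1 || p.2.2.1 || p.2.2.2 then "pet" else p.1)

def adjust_vision_result_alt (vision_result : List (List String)) : List (List String) :=
  vision_result.map pvDilate

-- ===== PRECONDITION & SPEC =====
def Spec_adjust_vision_result (vision_result : List (List String)) (out : List (List String)) : Prop := out = adjust_vision_result_alt vision_result
instance (vision_result : List (List String)) (out : List (List String)) : Decidable (Spec_adjust_vision_result vision_result out) := by unfold Spec_adjust_vision_result; infer_instance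

-- ===== CLAIM (what is proved, stated in full; the proofs are below) =====
def Claim_equal_adjust_vision_result : Prop := ∀ (vision_result : List (List String)), Dom_adjust_vision_result vision_result → Spec_adjust_vision_result vision_result (adjust_vision_result vision_result)

-- ===== LEMMAS AND PROOFS =====

theorem pv_getD_set (l : List String) (i j : Nat) (a d : String) :
    (l.set i a).getD j d = if i = j ∧ i < l.length then a else l.getD j d := by
  simp only [List.getD, List.getElem?_set]
  split_ifs with h1 h2 h3 h4 <;> simp_all <;> omega

-- positions written after processing loop indices 0..m-1
def pvW (s : List String) (m j : Nat) : Bool :=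
  (decide (1 ≤ j) && decide (j - 1 < m) && (s.getD (j - 1) "" == "pet"))
    || (decide (j + 1 < m) && (s.getD (j + 1) "" == "pet"))

theorem pvW_iff (s : List String) (m j : Nat) :
    pvW s m j = true ↔
      ((1 ≤ j ∧ j - 1 < m ∧ s.getD (j - 1) "" = "pet")
        ∨ (j + 1 < m ∧ s.getD (j + 1) "" = "pet")) := by
  simp [pvW, and_assoc]

theorem pv_loop_inv (s : List String) (m : Nat) (hm : m ≤ s.length - 3) :
    ((List.range m).foldl (pvStepA s) s).length = s.length ∧
    ∀ j, ((List.range m).foldl (pvStepA s) s).getD j "" =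
      if pvW s m j then "pet" else s.getD j "" := by
  induction m with
  | zero =>
    refine ⟨rfl, fun j => ?_⟩
    have h0 : pvW s 0 j = false := by
      rw [Bool.eq_false_iff]; intro h; rw [pvW_iff] at h; omega
    simp [h0]
  | succ m ih =>
    obtain ⟨hl, hg⟩ := ih (Nat.le_of_succ_le hm)
    rw [List.range_succ, List.foldl_append, List.foldl_cons, List.foldl_nil]
    set r := (List.range m).foldl (pvStepA s) s with hr
    unfold pvStepA
    by_cases hpet : s.getD m "" = "pet"
    · rw [if_pos hpet]
      have hmn : m + 4 ≤ s.length := by omega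
      constructor
      · by_cases hm0 : m > 0 <;> simp [hm0, hl]
      · intro j
        by_cases hm0 : m > 0
        · rw [if_pos hm0, pv_getD_set, pv_getD_set]
          simp only [List.length_set, hl]
          by_cases h1 : m + 1 = j
          · subst h1
            rw [if_pos ⟨rfl, by omega⟩, if_pos]
            rw [pvW_iff]; left; exact ⟨by omega, by omega, by simpa using hpet⟩
          · rw [if_neg (by omega)]
            by_cases h2 : m - 1 = j
            · subst h2
              rw [if_pos ⟨rfl, by omega⟩, if_pos]
              rw [pvW_iff]; right
              refine ⟨by omega, ?_⟩
              have he : m - 1 + 1 = m := by omega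
              rw [he]; exact hpet
            · rw [if_neg (by omega), hg j]
              have hpw : pvW s (m + 1) j = pvW s m j := by
                rw [Bool.eq_iff_iff, pvW_iff, pvW_iff]
                constructor
                · rintro (⟨ha, hb, hc⟩ | ⟨hb, hc⟩)
                  · rcases Nat.lt_or_ge (j - 1) m with hlt | hge
                    · exact Or.inl ⟨ha, hlt, hc⟩
                    · exact (show False by omega).elim
                  · rcases Nat.lt_or_ge (j + 1) m with hlt | hge
                    · exact Or.inr ⟨hlt, hc⟩
                    · exact (show False by omega).elim
                · rintro (⟨ha, hb, hc⟩ | ⟨hb, hc⟩)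
                  · exact Or.inl ⟨ha, by omega, hc⟩
                  · exact Or.inr ⟨by omega, hc⟩
              rw [hpw]
        · rw [if_neg hm0, pv_getD_set, hl]
          have hm0' : m = 0 := by omega
          subst hm0'
          by_cases h1 : 1 = j
          · subst h1
            rw [if_pos ⟨rfl, by omega⟩, if_pos]
            rw [pvW_iff]; left; exact ⟨by omega, by omega, by simpa using hpet⟩
          · rw [if_neg (by omega), hg j]
            have hpw : pvW s 1 j = pvW s 0 j := by
              rw [Bool.eq_iff_iff, pvW_iff, pvW_iff]
              constructor
              · rintro (⟨ha, hb, hc⟩ | ⟨hb, hc⟩) <;> exact (show False by omega).elim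
              · rintro (⟨ha, hb, hc⟩ | ⟨hb, hc⟩) <;> exact (show False by omega).elim
            rw [hpw]
    · rw [if_neg hpet]
      refine ⟨hl, fun j => ?_⟩
      rw [hg j]
      have hpw : pvW s (m + 1) j = pvW s m j := by
        rw [Bool.eq_iff_iff, pvW_iff, pvW_iff]
        constructor
        · rintro (⟨ha, hb, hc⟩ | ⟨hb, hc⟩)
          · rcases Nat.lt_or_ge (j - 1) m with hlt | hge
            · exact Or.inl ⟨ha, hlt, hc⟩
            · have he : j - 1 = m := by omega
              exact absurd (he ▸ hc) hpet
          · rcases Nat.lt_or_ge (j + 1) m with hlt | hge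
            · exact Or.inr ⟨hlt, hc⟩
            · have he : j + 1 = m := by omega
              exact absurd (he ▸ hc) hpet
        · rintro (⟨ha, hb, hc⟩ | ⟨hb, hc⟩)
          · exact Or.inl ⟨ha, by omega, hc⟩
          · exact Or.inr ⟨by omega, hc⟩
      rw [hpw]

theorem pv_core_length (s : List String) : (pvCoreOf s).length = s.length := by
  simp [pvCoreOf, pvPets]

theorem pv_core_getD (s : List String) (i : Nat) :
    (pvCoreOf s).getD i false = (decide (i < s.length - 3) && (s.getD i "" == "pet")) := by
  unfold pvCoreOf pvPets
  simp only [List.getD, List.getElem?_append, List.length_take, List.length_map]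
  by_cases h : i < s.length - 3
  · have hi : i < s.length := by omega
    simp [h, hi]
  · rw [if_neg (by omega)]
    rw [List.getElem?_replicate]
    split <;> simp [h]

theorem pv_nxt_getD (s : List String) (j : Nat) :
    ((pvCoreOf s).drop 1 ++ [false]).getD j false = (pvCoreOf s).getD (1 + j) false := by
  have hcl := pv_core_length s
  simp only [List.getD, List.getElem?_append, List.length_drop, List.getElem?_drop]
  by_cases h : j < (pvCoreOf s).length - 1
  · simp [h]
  · rw [if_neg h]
    have h2 : (pvCoreOf s)[1 + j]? = none := List.getElem?_eq_none (by omega)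
    rw [h2]
    cases hdiff : j - ((pvCoreOf s).length - 1) <;> simp

theorem pv_prv_getD (s : List String) (j : Nat) :
    (false :: (pvCoreOf s).dropLast).getD j false
      = (decide (1 ≤ j) && decide (j - 1 < s.length - 3) && (s.getD (j - 1) "" == "pet")) := by
  cases j with
  | zero => simp
  | succ k =>
    have hcl := pv_core_length s
    have hd : (false :: (pvCoreOf s).dropLast).getD (k + 1) false = (pvCoreOf s).dropLast.getD k false := by
      simp [List.getD]
    rw [hd]
    by_cases h : k < (pvCoreOf s).length - 1
    · rw [List.dropLast_eq_take]
      have hk : k < ((pvCoreOf s).take ((pvCoreOf s).length - 1)).length := by simp; omega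
      rw [List.getD_eq_getElem _ _ hk, List.getElem_take, ← List.getD_eq_getElem _ _ (by omega : k < (pvCoreOf s).length), pv_core_getD]
      simp
    · have hk : ((pvCoreOf s).dropLast).length ≤ k := by simp; omega
      rw [List.getD_eq_default _ _ hk]
      simp [show ¬ (k < s.length - 3) by omega]

-- A's scatter loop computes exactly B's dilated-mask overlay
theorem pv_line_eq (s : List String) :
    (List.range (s.length - 3)).foldl (pvStepA s) s
      = (s.zip ((pvPets s).zip
          (((pvCoreOf s).drop 1 ++ [false]).zip (false :: (pvCoreOf s).dropLast)))).map
        (fun p => if p.2.1 || p.2.2.1 || p.2.2.2 then "pet" else p.1) := by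
  obtain ⟨hl, hg⟩ := pv_loop_inv s (s.length - 3) le_rfl
  have hcl := pv_core_length s
  apply List.ext_getElem
  · rw [hl]
    simp [pvPets, hcl]
    omega
  · intro j h1 h2
    have hj : j < s.length := by simpa [hl] using h1
    have hx := hg j
    rw [List.getD_eq_getElem _ _ h1] at hx
    rw [hx]
    rw [List.getElem_map, List.getElem_zip, List.getElem_zip, List.getElem_zip]
    have hpj : j < (pvPets s).length := by simp [pvPets]; omega
    have hnj : j < ((pvCoreOf s).drop 1 ++ [false]).length := by simp [hcl]; omega
    have hvj : j < (false :: (pvCoreOf s).dropLast).length := by simp [hcl]; omega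
    have e1 : (pvPets s)[j]'hpj = (s.getD j "" == "pet") := by
      simp [pvPets, List.getD, List.getElem?_eq_getElem hj]
    have e2 : ((pvCoreOf s).drop 1 ++ [false])[j]'hnj
        = (decide (j + 1 < s.length - 3) && (s.getD (j + 1) "" == "pet")) := by
      rw [← List.getD_eq_getElem _ false hnj, pv_nxt_getD, pv_core_getD, Nat.add_comm 1 j]
    have e3 : (false :: (pvCoreOf s).dropLast)[j]'hvj
        = (decide (1 ≤ j) && decide (j - 1 < s.length - 3) && (s.getD (j - 1) "" == "pet")) := by
      rw [← List.getD_eq_getElem _ false hvj, pv_prv_getD]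
    rw [e1, e2, e3]
    by_cases hp : s.getD j "" = "pet"
    · have hpe : s[j] = "pet" := by rwa [List.getD_eq_getElem _ _ hj] at hp
      simp [List.getD, List.getElem?_eq_getElem hj, hpe]
    · have hb : (s.getD j "" == "pet") = false := by simpa using hp
      rw [hb, Bool.false_or]
      have hw : pvW s (s.length - 3) j
          = ((decide (j + 1 < s.length - 3) && (s.getD (j + 1) "" == "pet"))
              || (decide (1 ≤ j) && decide (j - 1 < s.length - 3) && (s.getD (j - 1) "" == "pet"))) := by
        rw [pvW, Bool.or_comm]
      rw [hw, List.getD_eq_getElem _ _ hj]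

theorem pvLine_eq (vision_list : List String) : pvLineA vision_list = pvDilate vision_list := by
  unfold pvLineA pvDilate
  exact pv_line_eq (vision_list.map pvSplitLast)

theorem pv_foldl_app (xs : List (List String)) (acc : List (List String)) :
    xs.foldl (fun rst vision_list => rst ++ [pvLineA vision_list]) acc = acc ++ xs.map pvLineA := by
  induction xs generalizing acc with
  | nil => simp
  | cons x xs ih => simp [ih]

-- ===== VERDICT (by name: the statement is the Claim_ definition above) =====
theorem adjust_vision_result_spec : Claim_equal_adjust_vision_result := by
  intro vision_result _
  unfold Spec_adjust_vision_result adjust_vision_result adjust_vision_result_alt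
  rw [pv_foldl_app, List.nil_append]
  exact List.map_congr_left fun x _ => pvLine_eq x
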